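-- pv_equiv track=rewrite | github.com/vulkri/wow-sim-hof | chksum.py | adler32
-- ===== SOURCE A (Python) =====
-- def adler32(plain_text: str) -> int:
--     """
--     Function implements adler-32 hash.
--     Iterates and evaluates a new value for each character
--
--     >>> adler32('Algorithms')
--     363791387
--
--     >>> adler32('go adler em all')
--     708642122
--     """
--     MOD_ADLER = 65521
--     a = 1
--     b = 0
--     for plain_chr in plain_text:
-- #        a = (a + ord(plain_chr)) % MOD_ADLER
-- #        b = (b + a) % MOD_ADLER
--
--         a = (a + ord(plain_chr))
--         b = (b + a)
--
--     a = a % MOD_ADLER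
--     b = b % MOD_ADLER
--
--     return (b << 16) + a
-- ===== SOURCE B (Python) =====
-- def adler32(plain_text: str) -> int:
--     MOD_ADLER = 65521
--     ords = [ord(c) for c in plain_text]
--     n = len(ords)
--     total = 0
--     prefix_sums = []
--     for o in ords:
--         total += o
--         prefix_sums.append(total)
--     a = (1 + total) % MOD_ADLER
--     b = (n + sum(prefix_sums)) % MOD_ADLER
--     return (b << 16) + a
-- ===== Notes on version B (the rewrite author's own statement) =====
-- stated objective: alternative
-- what changed: Replaces the pair of running accumulators by staged passes: map to ord codes, build the prefix-sum list, then a = (1+total) % 65521 and b = (n + sum(prefix_sums)) % 65521, using that each a_i = 1 + prefix_i.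
import Mathlib
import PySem

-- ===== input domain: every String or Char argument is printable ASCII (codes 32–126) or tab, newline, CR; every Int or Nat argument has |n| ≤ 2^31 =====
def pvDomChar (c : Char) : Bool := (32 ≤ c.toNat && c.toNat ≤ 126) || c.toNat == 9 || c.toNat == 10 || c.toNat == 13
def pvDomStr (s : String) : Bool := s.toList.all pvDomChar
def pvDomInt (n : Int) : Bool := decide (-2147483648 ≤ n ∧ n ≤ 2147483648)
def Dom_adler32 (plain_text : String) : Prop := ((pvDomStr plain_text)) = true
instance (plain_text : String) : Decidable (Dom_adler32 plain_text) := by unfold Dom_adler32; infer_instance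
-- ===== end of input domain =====

-- B replaces A's two per-character running accumulators by staged passes (map to ords,
-- prefix-sum list, sums), using a_i = 1 + prefix_i; same O(n) cost (objective: alternative).

-- ===== PORT A =====
def adler32 (plain_text : String) : Int :=
  let p := plain_text.toList.foldl
    (fun (ab : Int × Int) c => (ab.1 + (c.toNat : Int), ab.2 + ab.1 + (c.toNat : Int))) (1, 0)
  let a := PySem.Int.mod p.1 65521
  let b := PySem.Int.mod p.2 65521
  -- b << 16: b is nonnegative (mod by positive 65521), so the shift is exactly b * 2^16
  b * 65536 + a

-- ===== PORT B =====
def adler32_alt (plain_text : String) : Int :=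
  let ords : List Int := plain_text.toList.map (fun c => (c.toNat : Int))
  let n : Int := ords.length
  -- the loop building `total` and the prefix_sums list
  let st := ords.foldl (fun (st : Int × List Int) o => (st.1 + o, st.2 ++ [st.1 + o])) (0, [])
  let a := PySem.Int.mod (1 + st.1) 65521
  let b := PySem.Int.mod (n + st.2.sum) 65521
  -- b << 16: b is nonnegative (mod by positive 65521), so the shift is exactly b * 2^16
  b * 65536 + a

-- ===== PRECONDITION & SPEC =====
def Spec_adler32 (plain_text : String) (out : Int) : Prop := out = adler32_alt plain_text
instance (plain_text : String) (out : Int) : Decidable (Spec_adler32 plain_text out) := by unfold Spec_adler32; infer_instance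

-- ===== CLAIM (what is proved, stated in full; the proofs are below) =====
def Claim_equal_adler32 : Prop := ∀ (plain_text : String), Dom_adler32 plain_text → Spec_adler32 plain_text (adler32 plain_text)

-- ===== LEMMAS AND PROOFS =====

-- Σ ord over the remaining characters
def pvS (os : List Int) : Int := os.sum

-- weighted sum: each remaining element counted once per later step
def pvW : List Int → Int
  | [] => 0
  | o :: t => ((t.length : Int) + 1) * o + pvW t

theorem pvA_fold (cs : List Char) (a0 b0 : Int) :
    cs.foldl (fun (ab : Int × Int) c => (ab.1 + (c.toNat : Int), ab.2 + ab.1 + (c.toNat : Int))) (a0, b0)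
      = (a0 + pvS (cs.map (fun c => (c.toNat : Int))),
         b0 + (cs.length : Int) * a0 + pvW (cs.map (fun c => (c.toNat : Int)))) := by
  induction cs generalizing a0 b0 with
  | nil => simp [pvS, pvW]
  | cons c t ih =>
      simp only [List.foldl_cons, ih, pvS, pvW, List.map_cons, List.sum_cons, List.length_cons,
        List.length_map, Prod.mk.injEq]
      push_cast
      constructor <;> ring

theorem pvB_fold_fst (os : List Int) (t0 : Int) (ps : List Int) :
    (os.foldl (fun (st : Int × List Int) o => (st.1 + o, st.2 ++ [st.1 + o])) (t0, ps)).1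
      = t0 + pvS os := by
  induction os generalizing t0 ps with
  | nil => simp [pvS]
  | cons o t ih => simp only [List.foldl_cons, ih, pvS, List.sum_cons]; ring

theorem pvB_fold_snd_sum (os : List Int) (t0 : Int) (ps : List Int) :
    (os.foldl (fun (st : Int × List Int) o => (st.1 + o, st.2 ++ [st.1 + o])) (t0, ps)).2.sum
      = ps.sum + (os.length : Int) * t0 + pvW os := by
  induction os generalizing t0 ps with
  | nil => simp [pvW]
  | cons o t ih =>
      simp only [List.foldl_cons, ih, pvW, List.length_cons, List.sum_append, List.sum_cons,
        List.sum_nil]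
      push_cast
      ring

-- ===== VERDICT (by name: the statement is the Claim_ definition above) =====
theorem adler32_spec : Claim_equal_adler32 := by
  intro s _
  unfold Spec_adler32 adler32 adler32_alt
  simp only [pvA_fold, pvB_fold_fst, pvB_fold_snd_sum, List.length_map, List.sum_nil]
  ring_nf
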